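-- pv_equiv track=rewrite | github.com/alfredsimkin/neutral_motif_simulator | custom2.py | count_in_base
-- ===== SOURCE A (Python) =====
-- def count_in_base(string, base, valuestring):
-- 	outlist=[]
-- 	full_length=len(string)
-- 	for count in range(base**len(string)):
-- 		outlist.append(string)
-- 		if string==valuestring[-2]*full_length:
-- 			break
-- 		position=len(string)-1
-- 		value=valuestring.index(string[position])
-- 		string=string[:position]+valuestring[value+1]+string[position+1:]
-- 		while value>=(base-1) and count<(base**len(string)):
-- 			string=string[:position]+valuestring[0]+string[position+1:]
-- 			position-=1
-- 			value=valuestring.index(string[position])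
-- 			string=string[:position]+valuestring[value+1]+string[position+1:]
-- 	return outlist
-- ===== SOURCE B (Python) =====
-- def count_in_base(string, base, valuestring):
-- 	full_length = len(string)
-- 	n = 0
-- 	for ch in string:
-- 		n = n * base + valuestring.find(ch)
-- 	terminal = valuestring[-2] * full_length
-- 	outlist = []
-- 	for _ in range(base ** full_length):
-- 		m = n
-- 		chars = []
-- 		for _ in range(full_length):
-- 			chars.append(valuestring[m % base])
-- 			m //= base
-- 		s = ''.join(reversed(chars))
-- 		outlist.append(s)
-- 		if s == terminal:
-- 			break
-- 		n += 1
-- 	return outlist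
-- ===== Notes on version B (the rewrite author's own statement) =====
-- stated objective: simpler
-- what changed: Replaces A's per-character string-surgery increment with carry propagation (slice+index+rebuild, inner while loop) by plain integer arithmetic: parse the start string to an integer once, then render each successive integer to a fixed-width base-b string by repeated divmod.
-- outside the precondition, e.g. on count_in_base('BA', 2, 'ABCD'): A returns ['BA', 'BB', 'ABAA', 'ABAB'], B returns ['BA', 'BB', 'AA', 'AB']; on count_in_base('CC', 2, 'ABCD'): A returns ['CC'], B returns ['BA', 'BB', 'AA', 'AB']
import Mathlib
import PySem

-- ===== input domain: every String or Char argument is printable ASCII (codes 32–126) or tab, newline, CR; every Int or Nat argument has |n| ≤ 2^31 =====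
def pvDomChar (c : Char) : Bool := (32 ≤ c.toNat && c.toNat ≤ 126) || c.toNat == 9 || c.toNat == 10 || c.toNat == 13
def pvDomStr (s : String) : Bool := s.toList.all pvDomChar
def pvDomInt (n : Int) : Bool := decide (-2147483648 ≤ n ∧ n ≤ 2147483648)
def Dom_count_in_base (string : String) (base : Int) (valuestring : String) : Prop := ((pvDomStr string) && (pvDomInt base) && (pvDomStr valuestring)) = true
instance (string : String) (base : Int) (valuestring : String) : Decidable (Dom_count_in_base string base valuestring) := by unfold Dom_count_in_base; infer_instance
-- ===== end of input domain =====

-- B replaces A's string-surgery carry-propagation increment by integer arithmetic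
-- (parse once, then render n, n+1, … by repeated divmod): simpler, same cost.


-- ===== PORT A =====
-- string = string[:position] + c + string[position+1:]
def pySetAt (cs : List Char) (position : Int) (c : Char) : List Char :=
  PySem.List.slice cs none (some position) ++ [c] ++ PySem.List.slice cs (some (position + 1)) none

-- the inner 'while value>=(base-1) and count<(base**len(string))' loop; fuel-bounded,
-- none = a raising Python execution (IndexError/ValueError) or fuel exhaustion (unreached under Pre_)
def countWhile (fuel : Nat) (base : Int) (vs : List Char) (count : Int) (cs : List Char)
    (position value : Int) : Option (List Char) :=
  match fuel with
  | 0 => none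
  | Nat.succ fuel =>
    if value ≥ base - 1 ∧ count < base ^ cs.length then
      match PySem.List.pyGet? vs 0 with        -- valuestring[0]
      | none => none
      | some c0 =>
        let cs1 := pySetAt cs position c0
        let position1 := position - 1
        match PySem.List.pyGet? cs1 position1 with      -- string[position]
        | none => none
        | some ch =>
          match PySem.List.index? vs ch with            -- valuestring.index(...): single char, = first index
          | none => none
          | some v =>
            match PySem.List.pyGet? vs ((v : Int) + 1) with   -- valuestring[value+1]
            | none => none
            | some c2 => countWhile fuel base vs count (pySetAt cs1 position1 c2) position1 (v : Int)
    else some cs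

-- the 'for count in range(base**len(string))' loop with its break
def countFor (counts : List Int) (base : Int) (vs : List Char) (full_length : Int)
    (cs : List Char) (outlist : List (List Char)) : Option (List (List Char)) :=
  match counts with
  | [] => some outlist
  | count :: rest =>
    let outlist := outlist ++ [cs]
    match PySem.List.pyGet? vs (-2) with       -- valuestring[-2]
    | none => none
    | some t =>
      if cs = PySem.List.pyRepeat [t] full_length then some outlist
      else
        let position : Int := (cs.length : Int) - 1
        match PySem.List.pyGet? cs position with
        | none => none
        | some ch =>
          match PySem.List.index? vs ch with
          | none => none
          | some v =>
            match PySem.List.pyGet? vs ((v : Int) + 1) with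
            | none => none
            | some c2 =>
              let cs1 := pySetAt cs position c2
              match countWhile (cs1.length + 2) base vs count cs1 position (v : Int) with
              | none => none
              | some cs2 => countFor rest base vs full_length cs2 outlist

def count_in_base (string : String) (base : Int) (valuestring : String) : List String :=
  let cs := string.toList
  ((countFor (PySem.List.pyRange 0 (base ^ cs.length) 1) base valuestring.toList
      (cs.length : Int) cs []).getD []).map String.ofList

-- ===== PORT B =====
-- n = 0; for ch in string: n = n*base + valuestring.find(ch)
def altParse (vs : List Char) (base : Int) (n : Int) (cs : List Char) : Int :=
  match cs with
  | [] => n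
  | c :: rest => altParse vs base (n * base + PySem.Chars.find vs [c]) rest

-- chars = []; for _ in range(full_length): chars.append(valuestring[m % base]); m //= base
def altDigits (full_length : Nat) (base : Int) (vs : List Char) (m : Int) : Option (List Char) :=
  match full_length with
  | 0 => some []
  | Nat.succ k =>
    match PySem.List.pyGet? vs (PySem.Int.mod m base) with
    | none => none
    | some c => (altDigits k base vs (PySem.Int.floordiv m base)).map (fun r => c :: r)

-- for _ in range(base ** full_length): … break on terminal, else n += 1
def altFor (iters : List Int) (full_length : Nat) (base : Int) (vs : List Char)
    (terminal : List Char) (n : Int) (out : List (List Char)) : Option (List (List Char)) :=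
  match iters with
  | [] => some out
  | _ :: rest =>
    match altDigits full_length base vs n with
    | none => none
    | some chars =>
      let s := chars.reverse               -- ''.join(reversed(chars))
      let out := out ++ [s]
      if s = terminal then some out else altFor rest full_length base vs terminal (n + 1) out

def count_in_base_alt (string : String) (base : Int) (valuestring : String) : List String :=
  let cs := string.toList
  let vs := valuestring.toList
  let n := altParse vs base 0 cs
  match PySem.List.pyGet? vs (-2) with
  | none => []
  | some t =>
    let terminal := PySem.List.pyRepeat [t] (cs.length : Int)
    ((altFor (PySem.List.pyRange 0 (base ^ cs.length) 1) cs.length base vs terminal n []).getD []).map String.ofList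

-- ===== PRECONDITION & SPEC =====
-- Pre_ admits (i) the degenerate inputs on which the loop body does no real work — an empty
-- string, or a non-positive base**len making range() empty — and (ii) the function's natural
-- domain: base ≥ 1 and valuestring = `base` distinct digit characters followed by exactly one
-- sentinel (so valuestring[-2] is the largest digit), with string written over those digits.
-- Outside this A usually raises ValueError/IndexError, and where it still returns the
-- terminal/carry machinery is operating on an alphabet it was not written for (carry past
-- position 0 even changes the string length), so no particular enumeration is specified there
-- and A's and B's values legitimately differ.
def Pre_count_in_base (string : String) (base : Int) (valuestring : String) : Prop :=
  (2 ≤ valuestring.toList.length ∧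
    (string.toList = [] ∨ base ^ string.toList.length ≤ 0))
  ∨ (1 ≤ base ∧ (valuestring.toList.length : Int) = base + 1 ∧
     (valuestring.toList.take base.toNat).Nodup ∧
     string.toList.all (fun c => (valuestring.toList.take base.toNat).contains c) = true)

instance (string : String) (base : Int) (valuestring : String) : Decidable (Pre_count_in_base string base valuestring) := by
  unfold Pre_count_in_base; infer_instance

def pvWitness_count_in_base : String × Int × String := ("ACA", 4, "ACGT_")

def Spec_count_in_base (string : String) (base : Int) (valuestring : String) (out : List String) : Prop := out = count_in_base_alt string base valuestring
instance (string : String) (base : Int) (valuestring : String) (out : List String) : Decidable (Spec_count_in_base string base valuestring out) := by unfold Spec_count_in_base; infer_instance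

-- ===== CLAIM (what is proved, stated in full; the proofs are below) =====
def Claim_equal_count_in_base : Prop := ∀ (string : String) (base : Int) (valuestring : String), Dom_count_in_base string base valuestring → Pre_count_in_base string base valuestring → Spec_count_in_base string base valuestring (count_in_base string base valuestring)

-- ===== LEMMAS AND PROOFS =====

-- first index of a character (the value Python's valuestring.index returns where it returns)
def pvIdx (vs : List Char) (c : Char) : Nat := (PySem.List.index? vs c).getD 0

-- running value of A's counter string read as big-endian base-`base` digits via pvIdx
def pvVal (vs : List Char) (base : Int) (a : Int) (cs : List Char) : Int :=
  cs.foldl (fun acc c => acc * base + ((pvIdx vs c : Nat) : Int)) a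

lemma pv_index?_eq (vs : List Char) (c : Char) (h : c ∈ vs) :
    PySem.List.index? vs c = some (pvIdx vs c) := by
  have hs := (PySem.List.index?_isSome_iff (xs := vs) (v := c)).2 h
  obtain ⟨k, hk⟩ := Option.isSome_iff_exists.mp hs
  unfold pvIdx
  rw [hk]
  rfl

lemma pv_getElem_pvIdx (vs : List Char) (c : Char) (h : c ∈ vs) :
    ∃ (hlt : pvIdx vs c < vs.length), vs[pvIdx vs c] = c := by
  obtain ⟨hlt, hget, _⟩ := PySem.List.getElem_of_index?_eq_some (pv_index?_eq vs c h)
  exact ⟨hlt, hget⟩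

lemma pv_idx_lt (vs : List Char) (b : Nat) (c : Char) (h : c ∈ vs.take b) : pvIdx vs c < b := by
  have hvs : vs = vs.take b ++ vs.drop b := (List.take_append_drop b vs).symm
  have h1 : PySem.List.index? vs c = PySem.List.index? (vs.take b) c := by
    conv_lhs => rw [hvs]
    exact PySem.List.index?_append_of_mem _ h
  obtain ⟨hlt, _, _⟩ := PySem.List.getElem_of_index?_eq_some (pv_index?_eq _ c h)
  have h2 : pvIdx vs c = pvIdx (vs.take b) c := by unfold pvIdx; rw [h1]
  obtain ⟨hlt2, _⟩ := pv_getElem_pvIdx (vs.take b) c h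
  rw [h2]
  calc pvIdx (vs.take b) c < (vs.take b).length := hlt2
    _ ≤ b := by simp

lemma pv_nodup_getElem_inj (vs : List Char) (b : Nat) (hnd : (vs.take b).Nodup)
    (i j : Nat) (hi : i < b) (hj : j < b) (hib : i < vs.length) (hjb : j < vs.length)
    (h : vs[i] = vs[j]) : i = j := by
  have hi' : i < (vs.take b).length := by simp; all_goals omega
  have hj' : j < (vs.take b).length := by simp; all_goals omega
  have : (vs.take b)[i] = (vs.take b)[j] := by
    rw [List.getElem_take, List.getElem_take]; exact h
  exact (List.Nodup.getElem_inj_iff hnd).mp this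

lemma pv_index?_getElem (vs : List Char) (b : Nat) (hnd : (vs.take b).Nodup)
    (i : Nat) (hi : i < b) (hib : i < vs.length) :
    PySem.List.index? vs vs[i] = some i := by
  rw [PySem.List.index?_eq_some_iff]
  refine ⟨vs.take i, vs.drop (i + 1), ?_, by simp; all_goals omega, ?_⟩
  · conv_lhs => rw [← List.take_append_drop i vs]
    congr 1
    exact (List.getElem_cons_drop hib).symm
  · intro hmem
    obtain ⟨j, hj, hval⟩ := List.getElem_of_mem hmem
    have hj' : j < i := by simp at hj; omega
    have : vs[j]'(by omega) = vs[i] := by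
      rw [← hval, List.getElem_take]
    exact absurd (pv_nodup_getElem_inj vs b hnd j i (by omega) hi (by omega) hib this) (by omega)

lemma pv_pvIdx_getElem (vs : List Char) (b : Nat) (hnd : (vs.take b).Nodup)
    (i : Nat) (hi : i < b) (hib : i < vs.length) : pvIdx vs vs[i] = i := by
  unfold pvIdx; rw [pv_index?_getElem vs b hnd i hi hib]; rfl

lemma pv_mem_take (vs : List Char) (b : Nat) (i : Nat) (hi : i < b) (hib : i < vs.length) :
    vs[i] ∈ vs.take b := by
  have h : vs[i] = (vs.take b)[i]'(by simp; all_goals omega) := (List.getElem_take).symm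
  rw [h]; exact List.getElem_mem _

lemma pv_get_mid (u w : List Char) (d : Char) : (u ++ [d] ++ w)[u.length]? = some d := by
  rw [List.append_assoc, List.getElem?_append_right (le_refl _)]
  simp

lemma pvSet_mid (u w : List Char) (d c : Char) :
    pySetAt (u ++ [d] ++ w) (u.length : Int) c = u ++ [c] ++ w := by
  unfold pySetAt
  rw [PySem.List.slice_to _ (by positivity), PySem.List.slice_from _ (by positivity)]
  have h1 : ((u.length : Int)).toNat = u.length := by omega
  have h2 : ((u.length : Int) + 1).toNat = u.length + 1 := by omega
  rw [h1, h2]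
  have ht : List.take u.length (u ++ [d] ++ w) = u := by
    rw [List.append_assoc]; exact List.take_left
  have hd : List.drop (u.length + 1) (u ++ [d] ++ w) = w := by
    rw [show u.length + 1 = (u ++ [d]).length by simp]; exact List.drop_left
  rw [ht, hd]

lemma pvVal_append (vs : List Char) (base a : Int) (xs ys : List Char) :
    pvVal vs base a (xs ++ ys) = pvVal vs base (pvVal vs base a xs) ys := by
  unfold pvVal; exact List.foldl_append ..

lemma pvVal_replicate_zero (vs : List Char) (base a : Int) (m : Nat) (c : Char)
    (hc : pvIdx vs c = 0) : pvVal vs base a (List.replicate m c) = a * base ^ m := by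
  induction m generalizing a with
  | zero => simp [pvVal]
  | succ k ih =>
    rw [List.replicate_succ]
    show pvVal vs base (a * base + ((pvIdx vs c : Nat) : Int)) (List.replicate k c) = _
    rw [ih, hc]
    push_cast
    ring

lemma pvVal_replicate_max (vs : List Char) (base a : Int) (b : Nat) (hb : 1 ≤ b)
    (hbase : base = (b : Int)) (m : Nat) (c : Char) (hc : pvIdx vs c = b - 1) :
    pvVal vs base a (List.replicate m c) = (a + 1) * base ^ m - 1 := by
  induction m generalizing a with
  | zero => simp [pvVal]
  | succ k ih =>
    rw [List.replicate_succ]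
    show pvVal vs base (a * base + ((pvIdx vs c : Nat) : Int)) (List.replicate k c) = _
    rw [ih, hc, hbase]
    have : (((b - 1 : Nat)) : Int) = (b : Int) - 1 := by omega
    rw [this]
    ring

lemma pvVal_nonneg (vs : List Char) (base : Int) (hbase : 1 ≤ base) :
    ∀ (cs : List Char) (a : Int), 0 ≤ a → 0 ≤ pvVal vs base a cs := by
  intro cs
  induction cs with
  | nil => intro a ha; simpa [pvVal]
  | cons c rest ih =>
    intro a ha
    show 0 ≤ pvVal vs base (a * base + ((pvIdx vs c : Nat) : Int)) rest
    exact ih _ (by positivity)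

lemma pv_prefix_single (l : List Char) (c : Char) : [c] <+: l ↔ l[0]? = some c := by
  constructor
  · rintro ⟨t, ht⟩; subst ht; simp
  · intro h
    cases l with
    | nil => simp at h
    | cons x t => simp at h; exact ⟨t, by simp [h]⟩

lemma pv_find_single (vs : List Char) (c : Char) (h : c ∈ vs) :
    PySem.Chars.find vs [c] = ((pvIdx vs c : Nat) : Int) := by
  have hnn : 0 ≤ PySem.Chars.find vs [c] :=
    (PySem.Chars.find_nonneg_iff vs [c]).mpr ((List.singleton_infix_iff c vs).mpr h)
  obtain ⟨hp, hmin⟩ := PySem.Chars.find_spec hnn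
  obtain ⟨hlt, hget, hmin2⟩ := PySem.List.getElem_of_index?_eq_some (pv_index?_eq vs c h)
  have hkc : vs[(PySem.Chars.find vs [c]).toNat]? = some c := by
    have h0 := (pv_prefix_single (vs.drop (PySem.Chars.find vs [c]).toNat) c).mp hp
    rwa [List.getElem?_drop, Nat.add_zero] at h0
  have hkl : (PySem.Chars.find vs [c]).toNat < vs.length := by
    rcases Nat.lt_or_ge (PySem.Chars.find vs [c]).toNat vs.length with h' | h'
    · exact h'
    · rw [List.getElem?_eq_none (by omega)] at hkc; cases hkc
  have hkval : vs[(PySem.Chars.find vs [c]).toNat]'hkl = c := by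
    rw [List.getElem?_eq_getElem hkl] at hkc
    exact Option.some_inj.mp hkc
  have hkeq : (PySem.Chars.find vs [c]).toNat = pvIdx vs c := by
    rcases Nat.lt_trichotomy (PySem.Chars.find vs [c]).toNat (pvIdx vs c) with h' | h' | h'
    · exact absurd hkval (hmin2 _ h')
    · exact h'
    · exfalso
      apply hmin (pvIdx vs c) h'
      rw [pv_prefix_single, List.getElem?_drop, Nat.add_zero, List.getElem?_eq_getElem hlt, hget]
  omega

lemma pv_altParse_eq (vs : List Char) (base : Int) :
    ∀ (cs : List Char) (a : Int), (∀ c ∈ cs, c ∈ vs) →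
      altParse vs base a cs = pvVal vs base a cs := by
  intro cs
  induction cs with
  | nil => intro a _; simp [altParse, pvVal]
  | cons c rest ih =>
    intro a hmem
    have hc : c ∈ vs := hmem c (by simp)
    show altParse vs base (a * base + PySem.Chars.find vs [c]) rest = _
    rw [pv_find_single vs c hc]
    exact ih _ (fun x hx => hmem x (by simp [hx]))

lemma pv_altDigits_spec (vs : List Char) (base : Int) (b : Nat) (hb : 1 ≤ b)
    (hbase : base = (b : Int)) (hlen : vs.length = b + 1) :
    ∀ (cs : List Char), (∀ c ∈ cs, c ∈ vs.take b) →
      altDigits cs.length base vs (pvVal vs base 0 cs) = some cs.reverse := by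
  intro cs
  induction cs using List.reverseRecOn with
  | nil => intro _; simp [altDigits, pvVal]
  | append_singleton ds c ih =>
    intro hmem
    have hc : c ∈ vs.take b := hmem c (by simp)
    have hc' : c ∈ vs := List.mem_of_mem_take hc
    have hvc : pvIdx vs c < b := pv_idx_lt vs b c hc
    have hpos : (0 : Int) < base := by rw [hbase]; exact_mod_cast hb
    have hval : pvVal vs base 0 (ds ++ [c]) = pvVal vs base 0 ds * base + ((pvIdx vs c : Nat) : Int) := by
      rw [pvVal_append]; rfl
    have hnn : 0 ≤ pvVal vs base 0 ds := pvVal_nonneg vs base (by omega) ds 0 (le_refl _)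
    have hmod : PySem.Int.mod (pvVal vs base 0 (ds ++ [c])) base = ((pvIdx vs c : Nat) : Int) := by
      rw [PySem.Int.mod_eq_emod_of_pos hpos, hval,
        show pvVal vs base 0 ds * base + ((pvIdx vs c : Nat) : Int)
          = ((pvIdx vs c : Nat) : Int) + pvVal vs base 0 ds * base by ring,
        Int.add_mul_emod_self_right]
      exact Int.emod_eq_of_lt (by positivity) (by rw [hbase]; exact_mod_cast hvc)
    have hdiv : PySem.Int.floordiv (pvVal vs base 0 (ds ++ [c])) base = pvVal vs base 0 ds := by
      rw [PySem.Int.floordiv_eq_ediv_of_pos hpos, hval,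
        show pvVal vs base 0 ds * base + ((pvIdx vs c : Nat) : Int)
          = ((pvIdx vs c : Nat) : Int) + pvVal vs base 0 ds * base by ring,
        Int.add_mul_ediv_right _ _ (by omega),
        Int.ediv_eq_zero_of_lt (by positivity) (by rw [hbase]; exact_mod_cast hvc)]
      ring
    have hlen' : (ds ++ [c]).length = ds.length + 1 := by simp
    rw [hlen']
    simp only [altDigits, hmod, hdiv]
    obtain ⟨hg, hget⟩ := pv_getElem_pvIdx vs c hc'
    have hpg : PySem.List.pyGet? vs ((pvIdx vs c : Nat) : Int) = some c := by
      rw [PySem.List.pyGet?_natCast]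
      simp [hg, hget]
    rw [hpg]
    rw [ih (fun x hx => hmem x (by simp [hx]))]
    simp

lemma pv_decomp (cmax : Char) :
    ∀ (cs : List Char), cs ≠ List.replicate cs.length cmax →
      ∃ pre c m, cs = pre ++ [c] ++ List.replicate m cmax ∧ c ≠ cmax := by
  intro cs
  induction cs using List.reverseRecOn with
  | nil => intro h; simp at h
  | append_singleton ds x ih =>
    intro h
    by_cases hx : x = cmax
    · subst hx
      have hds : ds ≠ List.replicate ds.length x := by
        intro hrep
        apply h
        rw [List.length_append, List.length_singleton, List.replicate_succ', ← hrep]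
      obtain ⟨pre, c, m, hshape, hc⟩ := ih hds
      refine ⟨pre, c, m + 1, ?_, hc⟩
      rw [List.replicate_succ', hshape]
      simp
    · refine ⟨ds, x, 0, by simp, hx⟩

lemma pv_get_mid' (u w : List Char) (d : Char) (k : Nat) (hk : k = u.length) :
    (u ++ [d] ++ w)[k]? = some d := by subst hk; exact pv_get_mid u w d

lemma pv_carry (vs : List Char) (base : Int) (b : Nat) (hb : 1 ≤ b) (hbase : base = (b : Int))
    (hlen : vs.length = b + 1) (hnd : (vs.take b).Nodup) (count : Int) :
    ∀ (m' fuel t : Nat) (pre : List Char) (c : Char) (hfuel : m' + 2 ≤ fuel)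
      (hvc : pvIdx vs c + 1 < b) (hcmem : c ∈ vs)
      (hcnt : count < base ^ (pre.length + 1 + m' + 1 + t)),
      countWhile fuel base vs count
        (pre ++ [c] ++ List.replicate m' (vs[b-1]'(by omega)) ++ [vs[b]'(by omega)]
          ++ List.replicate t (vs[0]'(by omega)))
        ((pre.length + 1 + m' : Nat) : Int) ((b - 1 : Nat) : Int)
      = some (pre ++ [vs[pvIdx vs c + 1]'(by omega)] ++ List.replicate (m' + 1 + t) (vs[0]'(by omega))) := by
  intro m'
  induction m' with
  | zero =>
    intro fuel t pre c hfuel hvc hcmem hcnt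
    cases fuel with
    | zero => omega
    | succ f =>
      simp only [List.replicate_zero, List.append_nil]
      simp only [countWhile]
      rw [if_pos (⟨by rw [hbase]; omega,
        by simp only [List.length_append, List.length_replicate, List.length_cons,
             List.length_nil]
           convert hcnt using 2
           all_goals omega⟩ : _ ∧ _)]
      have hget0 : PySem.List.pyGet? vs 0 = some (vs[0]'(by omega)) := by
        rw [show (0 : Int) = ((0 : Nat) : Int) by simp, PySem.List.pyGet?_natCast,
          List.getElem?_eq_getElem (by omega)]
      simp only [hget0]
      have hset1 : pySetAt (pre ++ [c] ++ [vs[b]'(by omega)] ++ List.replicate t (vs[0]'(by omega)))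
          ((pre.length + 1 + 0 : Nat) : Int) (vs[0]'(by omega))
          = pre ++ [c] ++ [vs[0]'(by omega)] ++ List.replicate t (vs[0]'(by omega)) := by
        rw [show ((pre.length + 1 + 0 : Nat) : Int) = ((pre ++ [c]).length : Int) by simp]
        exact pvSet_mid (pre ++ [c]) _ _ _
      simp only [hset1]
      have hpos1 : ((pre.length + 1 + 0 : Nat) : Int) - 1 = ((pre.length : Nat) : Int) := by
        push_cast; ring
      rw [hpos1]
      have hget1 : PySem.List.pyGet?
          (pre ++ [c] ++ [vs[0]'(by omega)] ++ List.replicate t (vs[0]'(by omega)))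
          ((pre.length : Nat) : Int) = some c := by
        rw [PySem.List.pyGet?_natCast, List.append_assoc (pre ++ [c])]
        exact pv_get_mid' pre _ c pre.length rfl
      simp only [hget1]
      simp only [pv_index?_eq vs c hcmem]
      have hget2 : PySem.List.pyGet? vs ((pvIdx vs c : Nat) + 1 : Int)
          = some (vs[pvIdx vs c + 1]'(by omega)) := by
        rw [show ((pvIdx vs c : Nat) + 1 : Int) = ((pvIdx vs c + 1 : Nat) : Int) by push_cast; ring,
          PySem.List.pyGet?_natCast, List.getElem?_eq_getElem (by omega)]
      simp only [hget2]
      have hre : pre ++ [c] ++ [vs[0]'(by omega)] ++ List.replicate t (vs[0]'(by omega))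
          = pre ++ [c] ++ ([vs[0]'(by omega)] ++ List.replicate t (vs[0]'(by omega))) := by
        simp [List.append_assoc]
      rw [hre]
      rw [show ((pre.length : Nat) : Int) = ((pre.length : Nat) : Int) from rfl]
      rw [pvSet_mid pre _ c _]
      cases f with
      | zero => omega
      | succ f' =>
        simp only [countWhile]
        rw [if_neg (by rintro ⟨h1, -⟩; rw [hbase] at h1; omega)]
        congr 1
        rw [show 0 + 1 + t = t + 1 by omega, List.replicate_succ]
        simp
  | succ m'' ih =>
    intro fuel t pre c hfuel hvc hcmem hcnt
    cases fuel with
    | zero => omega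
    | succ f =>
      simp only [countWhile]
      rw [if_pos (⟨by rw [hbase]; omega,
        by simp only [List.length_append, List.length_replicate, List.length_cons,
             List.length_nil]
           convert hcnt using 2
           all_goals omega⟩ : _ ∧ _)]
      have hget0 : PySem.List.pyGet? vs 0 = some (vs[0]'(by omega)) := by
        rw [show (0 : Int) = ((0 : Nat) : Int) by simp, PySem.List.pyGet?_natCast,
          List.getElem?_eq_getElem (by omega)]
      simp only [hget0]
      have hset1 : pySetAt (pre ++ [c] ++ List.replicate (m'' + 1) (vs[b-1]'(by omega))
            ++ [vs[b]'(by omega)] ++ List.replicate t (vs[0]'(by omega)))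
          ((pre.length + 1 + (m'' + 1) : Nat) : Int) (vs[0]'(by omega))
          = pre ++ [c] ++ List.replicate (m'' + 1) (vs[b-1]'(by omega))
            ++ [vs[0]'(by omega)] ++ List.replicate t (vs[0]'(by omega)) := by
        rw [show ((pre.length + 1 + (m'' + 1) : Nat) : Int)
            = (((pre ++ [c] ++ List.replicate (m'' + 1) (vs[b-1]'(by omega))).length : Nat) : Int) by
          simp; all_goals omega]
        exact pvSet_mid _ _ _ _
      simp only [hset1]
      have hpos1 : ((pre.length + 1 + (m'' + 1) : Nat) : Int) - 1
          = ((pre.length + 1 + m'' : Nat) : Int) := by push_cast; ring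
      rw [hpos1]
      have hc1eq : pre ++ [c] ++ List.replicate (m'' + 1) (vs[b-1]'(by omega))
            ++ [vs[0]'(by omega)] ++ List.replicate t (vs[0]'(by omega))
          = (pre ++ [c] ++ List.replicate m'' (vs[b-1]'(by omega))) ++ [vs[b-1]'(by omega)]
            ++ ([vs[0]'(by omega)] ++ List.replicate t (vs[0]'(by omega))) := by
        rw [List.replicate_succ']
        simp [List.append_assoc]
      rw [hc1eq]
      have hget1 : PySem.List.pyGet?
          ((pre ++ [c] ++ List.replicate m'' (vs[b-1]'(by omega))) ++ [vs[b-1]'(by omega)]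
            ++ ([vs[0]'(by omega)] ++ List.replicate t (vs[0]'(by omega))))
          ((pre.length + 1 + m'' : Nat) : Int) = some (vs[b-1]'(by omega)) := by
        rw [PySem.List.pyGet?_natCast]
        exact pv_get_mid' _ _ _ _ (by simp; all_goals omega)
      simp only [hget1]
      simp only [pv_index?_getElem vs b hnd (b-1) (by omega) (by omega)]
      have hget2 : PySem.List.pyGet? vs (((b - 1 : Nat) : Int) + 1) = some (vs[b]'(by omega)) := by
        rw [show (((b - 1 : Nat) : Int) + 1) = ((b : Nat) : Int) by omega,
          PySem.List.pyGet?_natCast, List.getElem?_eq_getElem (by omega)]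
      simp only [hget2]
      rw [show ((pre.length + 1 + m'' : Nat) : Int)
          = (((pre ++ [c] ++ List.replicate m'' (vs[b-1]'(by omega))).length : Nat) : Int) by
        simp; all_goals omega]
      rw [pvSet_mid _ _ _ _]
      have hrepl : [vs[0]'(by omega)] ++ List.replicate t (vs[0]'(by omega))
          = List.replicate (t + 1) (vs[0]'(by omega)) := by
        simp [List.replicate_succ]
      rw [hrepl]
      have h := ih f (t + 1) pre c (by omega) hvc hcmem
        (by rw [show pre.length + 1 + m'' + 1 + (t + 1) = pre.length + 1 + (m'' + 1) + 1 + t by omega]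
            exact hcnt)
      rw [show m'' + 1 + (t + 1) = m'' + 1 + 1 + t by omega] at h
      rw [show (((pre ++ [c] ++ List.replicate m'' (vs[b-1]'(by omega))).length : Nat) : Int)
          = ((pre.length + 1 + m'' : Nat) : Int) by simp; all_goals omega]
      exact h

lemma pv_countWhile_stop (base : Int) (vs : List Char) (count : Int) (cs : List Char)
    (position value : Int) (fuel : Nat) (hf : 1 ≤ fuel)
    (h : ¬(value ≥ base - 1 ∧ count < base ^ cs.length)) :
    countWhile fuel base vs count cs position value = some cs := by
  cases fuel with
  | zero => omega
  | succ f => simp only [countWhile]; rw [if_neg h]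

lemma pv_loop (vs : List Char) (base : Int) (b : Nat) (hb : 1 ≤ b) (hbase : base = (b : Int))
    (hlen : vs.length = b + 1) (hnd : (vs.take b).Nodup) (L : Nat) :
    ∀ (counts : List Int) (cs : List Char) (out : List (List Char))
      (hL : cs.length = L) (hmem : ∀ c ∈ cs, c ∈ vs.take b)
      (hcnts : ∀ k ∈ counts, k < base ^ L),
      countFor counts base vs (L : Int) cs out
      = altFor counts L base vs (List.replicate L (vs[b-1]'(by omega))) (pvVal vs base 0 cs) out := by
  intro counts
  induction counts with
  | nil => intros; simp [countFor, altFor]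
  | cons count rest ih =>
    intro cs out hL hmem hcnts
    have hneg2 : PySem.List.pyGet? vs (-2) = some (vs[b-1]'(by omega)) := by
      rw [PySem.List.pyGet?_neg_ofNat vs 2 (by omega) (by omega),
        show vs.length - 2 = b - 1 by omega, List.getElem?_eq_getElem (by omega)]
    have hterm : PySem.List.pyRepeat [vs[b-1]'(by omega)] ((L : Nat) : Int)
        = List.replicate L (vs[b-1]'(by omega)) := by
      rw [PySem.List.pyRepeat_singleton]; simp
    have hdig : altDigits L base vs (pvVal vs base 0 cs) = some cs.reverse := by
      rw [← hL]; exact pv_altDigits_spec vs base b hb hbase hlen cs hmem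
    simp only [countFor, altFor, hneg2, hdig, hterm, List.reverse_reverse]
    by_cases hcs : cs = List.replicate L (vs[b-1]'(by omega))
    · rw [if_pos hcs, if_pos hcs]
    · rw [if_neg hcs, if_neg hcs]
      obtain ⟨pre, c, m, hshape, hcne⟩ := pv_decomp (vs[b-1]'(by omega)) cs (by rw [hL]; exact hcs)
      rw [hshape] at hL hmem ⊢
      have hcmem' : c ∈ vs.take b := hmem c (by simp)
      have hcv : c ∈ vs := List.mem_of_mem_take hcmem'
      have hvcb : pvIdx vs c < b := pv_idx_lt vs b c hcmem'
      obtain ⟨hgetlt, hgetc⟩ := pv_getElem_pvIdx vs c hcv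
      have hvcne : pvIdx vs c ≠ b - 1 := by
        intro he
        exact hcne (by rw [← hgetc]; congr 1; all_goals omega)
      have hvc : pvIdx vs c + 1 < b := by omega
      have hlenL : pre.length + 1 + m = L := by
        have h0 := hL
        simp at h0
        omega
      have hcnt0 : count < base ^ L := hcnts count (by simp)
      have hidxmax : pvIdx vs (vs[b-1]'(by omega)) = b - 1 :=
        pv_pvIdx_getElem vs b hnd (b-1) (by omega) (by omega)
      have hidx0 : pvIdx vs (vs[0]'(by omega)) = 0 :=
        pv_pvIdx_getElem vs b hnd 0 (by omega) (by omega)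
      -- value bookkeeping
      have hvalstep : pvVal vs base 0 (pre ++ [vs[pvIdx vs c + 1]'(by omega)]
            ++ List.replicate m (vs[0]'(by omega)))
          = pvVal vs base 0 (pre ++ [c] ++ List.replicate m (vs[b-1]'(by omega))) + 1 := by
        rw [pvVal_append vs base 0 (pre ++ [vs[pvIdx vs c + 1]'(by omega)])
              (List.replicate m (vs[0]'(by omega))),
            pvVal_append vs base 0 (pre ++ [c]) (List.replicate m (vs[b-1]'(by omega))),
            pvVal_replicate_zero vs base _ m _ hidx0,
            pvVal_replicate_max vs base _ b hb hbase m _ hidxmax,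
            pvVal_append vs base 0 pre [vs[pvIdx vs c + 1]'(by omega)],
            pvVal_append vs base 0 pre [c]]
        have h1 : pvVal vs base (pvVal vs base 0 pre) [vs[pvIdx vs c + 1]'(by omega)]
            = pvVal vs base 0 pre * base + ((pvIdx vs c : Nat) : Int) + 1 := by
          show pvVal vs base 0 pre * base + ((pvIdx vs (vs[pvIdx vs c + 1]'(by omega)) : Nat) : Int) = _
          rw [pv_pvIdx_getElem vs b hnd (pvIdx vs c + 1) (by omega) (by omega)]
          push_cast
          ring
        have h2 : pvVal vs base (pvVal vs base 0 pre) [c]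
            = pvVal vs base 0 pre * base + ((pvIdx vs c : Nat) : Int) := rfl
        rw [h1, h2]
        ring
      -- the A-side one-step increment
      have hposA : ((pre ++ [c] ++ List.replicate m (vs[b-1]'(by omega))).length : Int) - 1
          = ((pre.length + m : Nat) : Int) := by simp; all_goals omega
      have hmemrest : ∀ k ∈ rest, k < base ^ L := fun k hk => hcnts k (by simp [hk])
      have hmem' : ∀ x ∈ pre ++ [vs[pvIdx vs c + 1]'(by omega)]
          ++ List.replicate m (vs[0]'(by omega)), x ∈ vs.take b := by
        intro x hx
        simp only [List.append_assoc, List.mem_append, List.mem_singleton,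
          List.mem_replicate] at hx
        rcases hx with hx | hx | hx
        · exact hmem x (by simp [hx])
        · rw [hx]; exact pv_mem_take vs b _ (by omega) (by omega)
        · rw [hx.2]; exact pv_mem_take vs b 0 (by omega) (by omega)
      have hL' : (pre ++ [vs[pvIdx vs c + 1]'(by omega)]
          ++ List.replicate m (vs[0]'(by omega))).length = L := by simp; all_goals omega
      have hstep : (match PySem.List.pyGet? (pre ++ [c] ++ List.replicate m (vs[b-1]'(by omega)))
            (((pre.length + m : Nat) : Int)) with
          | none => none
          | some ch =>
            match PySem.List.index? vs ch with
            | none => none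
            | some v =>
              match PySem.List.pyGet? vs ((v : Int) + 1) with
              | none => none
              | some c2 =>
                match countWhile ((pySetAt (pre ++ [c] ++ List.replicate m (vs[b-1]'(by omega)))
                      (((pre.length + m : Nat) : Int)) c2).length + 2) base vs count
                    (pySetAt (pre ++ [c] ++ List.replicate m (vs[b-1]'(by omega)))
                      (((pre.length + m : Nat) : Int)) c2)
                    (((pre.length + m : Nat) : Int)) (v : Int) with
                | none => none
                | some cs2 => countFor rest base vs (L : Int) cs2 (out ++ [pre ++ [c]
                    ++ List.replicate m (vs[b-1]'(by omega))])) 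
          = countFor rest base vs (L : Int) (pre ++ [vs[pvIdx vs c + 1]'(by omega)]
              ++ List.replicate m (vs[0]'(by omega)))
              (out ++ [pre ++ [c] ++ List.replicate m (vs[b-1]'(by omega))]) := by
        cases m with
        | zero =>
          simp only [List.replicate_zero, List.append_nil, Nat.add_zero]
          have hg : PySem.List.pyGet? (pre ++ [c]) ((pre.length : Nat) : Int) = some c := by
            rw [PySem.List.pyGet?_natCast, List.getElem?_append_right (le_refl _)]
            simp
          simp only [hg, pv_index?_eq vs c hcv]
          have hg2 : PySem.List.pyGet? vs ((pvIdx vs c : Nat) + 1 : Int)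
              = some (vs[pvIdx vs c + 1]'(by omega)) := by
            rw [show ((pvIdx vs c : Nat) + 1 : Int) = ((pvIdx vs c + 1 : Nat) : Int) by push_cast; ring,
              PySem.List.pyGet?_natCast, List.getElem?_eq_getElem (by omega)]
          simp only [hg2]
          have hset : pySetAt (pre ++ [c]) ((pre.length : Nat) : Int)
              (vs[pvIdx vs c + 1]'(by omega)) = pre ++ [vs[pvIdx vs c + 1]'(by omega)] := by
            have h3 := pvSet_mid pre [] c (vs[pvIdx vs c + 1]'(by omega))
            simpa using h3
          simp only [hset]
          rw [pv_countWhile_stop _ _ _ _ _ _ _ (by omega)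
            (by rintro ⟨h1, -⟩; rw [hbase] at h1; omega)]
        | succ m_ =>
          have hCSeq : pre ++ [c] ++ List.replicate (m_ + 1) (vs[b-1]'(by omega))
              = (pre ++ [c] ++ List.replicate m_ (vs[b-1]'(by omega))) ++ [vs[b-1]'(by omega)] := by
            rw [List.replicate_succ']
            simp [List.append_assoc]
          have hg : PySem.List.pyGet? (pre ++ [c] ++ List.replicate (m_ + 1) (vs[b-1]'(by omega)))
              ((pre.length + (m_ + 1) : Nat) : Int) = some (vs[b-1]'(by omega)) := by
            rw [PySem.List.pyGet?_natCast, hCSeq,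
              show pre.length + (m_ + 1)
                = (pre ++ [c] ++ List.replicate m_ (vs[b-1]'(by omega))).length by simp; all_goals omega,
              List.getElem?_append_right (le_refl _)]
            simp
          simp only [hg, pv_index?_getElem vs b hnd (b-1) (by omega) (by omega)]
          have hg2 : PySem.List.pyGet? vs (((b - 1 : Nat) : Int) + 1) = some (vs[b]'(by omega)) := by
            rw [show (((b - 1 : Nat) : Int) + 1) = ((b : Nat) : Int) by omega,
              PySem.List.pyGet?_natCast, List.getElem?_eq_getElem (by omega)]
          simp only [hg2]
          have hset : pySetAt (pre ++ [c] ++ List.replicate (m_ + 1) (vs[b-1]'(by omega)))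
              ((pre.length + (m_ + 1) : Nat) : Int) (vs[b]'(by omega))
              = (pre ++ [c] ++ List.replicate m_ (vs[b-1]'(by omega))) ++ [vs[b]'(by omega)] := by
            rw [hCSeq, show ((pre.length + (m_ + 1) : Nat) : Int)
                = (((pre ++ [c] ++ List.replicate m_ (vs[b-1]'(by omega))).length : Nat) : Int) by
              simp; all_goals omega]
            have h3 := pvSet_mid (pre ++ [c] ++ List.replicate m_ (vs[b-1]'(by omega))) []
              (vs[b-1]'(by omega)) (vs[b]'(by omega))
            simpa using h3
          simp only [hset]
          have hcw := pv_carry vs base b hb hbase hlen hnd count m_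
            (((pre ++ [c] ++ List.replicate m_ (vs[b-1]'(by omega))) ++ [vs[b]'(by omega)]).length + 2)
            0 pre c (by simp; all_goals omega) hvc hcv
            (by rw [show pre.length + 1 + m_ + 1 + 0 = L by omega]; exact hcnt0)
          simp only [List.replicate_zero, List.append_nil] at hcw
          rw [show ((pre.length + (m_ + 1) : Nat) : Int) = ((pre.length + 1 + m_ : Nat) : Int) by omega]
          rw [hcw]
      rw [hposA, hstep]
      rw [ih _ _ hL' hmem' hmemrest, hvalstep]

-- ===== VERDICT (by name: the statement is the Claim_ definition above) =====
theorem count_in_base_spec : Claim_equal_count_in_base := by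
  unfold Claim_equal_count_in_base Spec_count_in_base Pre_count_in_base
  intro string base valuestring _ hpre
  rcases hpre with ⟨hv2, hrest⟩ | ⟨hb1, hlen1, hnd, hmemb⟩
  · -- degenerate inputs: empty string (both return [""]) or an empty range (both return [])
    have hneg2 : PySem.List.pyGet? valuestring.toList (-2)
        = some (valuestring.toList[valuestring.toList.length - 2]'(by omega)) := by
      rw [PySem.List.pyGet?_neg_ofNat valuestring.toList 2 (by omega) (by omega),
        List.getElem?_eq_getElem (by omega)]
    unfold count_in_base count_in_base_alt
    rcases hrest with hempty | hneg
    · simp only [hempty]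
      rw [show base ^ ([] : List Char).length = 0 + 1 by norm_num,
        PySem.List.pyRange_one_singleton]
      simp [countFor, altFor, altParse, altDigits, hneg2, PySem.List.pyRepeat_singleton]
    · simp only [PySem.List.pyRange_one_eq_nil hneg]
      simp [countFor, altFor, hneg2]
  · have hb : 1 ≤ base.toNat := by omega
    have hbase : base = ((base.toNat : Nat) : Int) := by omega
    have hlen : valuestring.toList.length = base.toNat + 1 := by omega
    have hmem : ∀ c ∈ string.toList, c ∈ valuestring.toList.take base.toNat := by
      intro c hc
      exact List.contains_iff_mem.mp (List.all_eq_true.mp hmemb c hc)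
    have hmemv : ∀ c ∈ string.toList, c ∈ valuestring.toList :=
      fun c hc => List.mem_of_mem_take (hmem c hc)
    unfold count_in_base count_in_base_alt
    have hparse := pv_altParse_eq valuestring.toList base string.toList 0 hmemv
    have hneg2 : PySem.List.pyGet? valuestring.toList (-2)
        = some (valuestring.toList[base.toNat - 1]'(by omega)) := by
      rw [PySem.List.pyGet?_neg_ofNat valuestring.toList 2 (by omega) (by omega),
        show valuestring.toList.length - 2 = base.toNat - 1 by omega,
        List.getElem?_eq_getElem (by omega)]
    simp only [hparse, hneg2]
    have hterm : PySem.List.pyRepeat [valuestring.toList[base.toNat - 1]'(by omega)]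
        ((string.toList.length : Nat) : Int)
        = List.replicate string.toList.length (valuestring.toList[base.toNat - 1]'(by omega)) := by
      rw [PySem.List.pyRepeat_singleton]; simp
    rw [hterm]
    rw [pv_loop valuestring.toList base base.toNat hb hbase hlen hnd string.toList.length
      (PySem.List.pyRange 0 (base ^ string.toList.length) 1) string.toList [] rfl hmem
      (fun k hk => (PySem.List.mem_pyRange_one.mp hk).2)]
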